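-- pv_equiv track=rewrite | github.com/ianereed/Health-dashboard | meal_planner/tag_categories.py | _partition_tags_by_category
-- ===== SOURCE A (Python) =====
-- _CATEGORY_ORDER = ("cuisine", "meat_or_diet", "other")
--
-- def _partition_tags_by_category(
--     tags: list[str], category_map: dict[str, str]
-- ) -> dict[str, list[str]]:
--     """Group tags into ('cuisine', 'meat_or_diet', 'other') buckets.
--
--     Each bucket preserves the input order. Unknown tags fall through to 'other'.
--     Returns a dict with all three keys, even if some buckets are empty.
--     """
--     buckets: dict[str, list[str]] = {cat: [] for cat in _CATEGORY_ORDER}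
--     for tag in tags:
--         cat = category_map.get(tag, "other")
--         buckets[cat].append(tag)
--     return buckets
-- ===== SOURCE B (Python) =====
-- _CATEGORY_ORDER = ("cuisine", "meat_or_diet", "other")
--
-- def _partition_tags_by_category(tags, category_map):
--     """One dict comprehension: build each bucket by filtering the tag list."""
--     return {
--         cat: [t for t in tags if category_map.get(t, "other") == cat]
--         for cat in _CATEGORY_ORDER
--     }
-- ===== Notes on version B (the rewrite author's own statement) =====
-- stated objective: idiomatic
-- what changed: Replaces the single append-to-bucket pass over tags with a dict comprehension over the three fixed categories, building each bucket by filtering the tag list with the same default-to-'other' lookup.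
import Mathlib
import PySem

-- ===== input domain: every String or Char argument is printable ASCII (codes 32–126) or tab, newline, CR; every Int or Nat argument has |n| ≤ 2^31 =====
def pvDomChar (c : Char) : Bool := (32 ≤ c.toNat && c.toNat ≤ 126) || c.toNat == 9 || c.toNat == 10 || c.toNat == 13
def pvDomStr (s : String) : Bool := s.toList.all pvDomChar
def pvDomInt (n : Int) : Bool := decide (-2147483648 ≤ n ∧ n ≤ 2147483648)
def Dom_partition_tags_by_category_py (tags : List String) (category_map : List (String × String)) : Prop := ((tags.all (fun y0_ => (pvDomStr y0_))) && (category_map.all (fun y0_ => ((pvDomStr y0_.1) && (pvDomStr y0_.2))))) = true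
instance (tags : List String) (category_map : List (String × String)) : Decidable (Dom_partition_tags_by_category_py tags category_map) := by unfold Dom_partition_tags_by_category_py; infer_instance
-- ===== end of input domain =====

-- B replaces A's single pass that appends each tag to its bucket with a map over the three
-- fixed categories, each bucket obtained by filtering the tag list (more idiomatic, same cost).


-- ===== PORT A =====
-- buckets = {cat: [] for cat in _CATEGORY_ORDER}; for tag: buckets[category_map.get(tag,"other")].append(tag).
-- 'buckets[cat].append(tag)' is ported as Dict.modify; inside Pre_ the key is always present, so this is exact
-- (the KeyError case, cat not a bucket key, is excluded by Pre_ below).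
def partition_tags_by_category_py (tags : List String) (category_map : List (String × String)) : List (String × List String) :=
  (tags.foldl
    (fun b tag => b.modify ((PySem.Dict.mk category_map).getD tag "other") [] (fun xs => xs ++ [tag]))
    (PySem.Dict.mk [("cuisine", []), ("meat_or_diet", []), ("other", [])])).items

-- ===== PORT B =====
def partition_tags_by_category_py_alt (tags : List String) (category_map : List (String × String)) : List (String × List String) :=
  ["cuisine", "meat_or_diet", "other"].map
    (fun cat => (cat, tags.filter (fun t => (PySem.Dict.mk category_map).getD t "other" == cat)))

-- ===== PRECONDITION & SPEC =====
-- Pre_ excludes exactly the inputs where A raises KeyError: a tag whose mapped category is not one of the three bucket names.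
def Pre_partition_tags_by_category_py (tags : List String) (category_map : List (String × String)) : Prop :=
  ∀ t ∈ tags, (PySem.Dict.mk category_map).getD t "other" ∈ (["cuisine", "meat_or_diet", "other"] : List String)
instance (tags : List String) (category_map : List (String × String)) : Decidable (Pre_partition_tags_by_category_py tags category_map) := by unfold Pre_partition_tags_by_category_py; infer_instance
def pvWitness_partition_tags_by_category_py : List String × (List (String × String)) :=
  (["a", "b", "c"], [("a", "cuisine"), ("c", "meat_or_diet")])

def Spec_partition_tags_by_category_py (tags : List String) (category_map : List (String × String)) (out : List (String × List String)) : Prop := out = partition_tags_by_category_py_alt tags category_map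
instance (tags : List String) (category_map : List (String × String)) (out : List (String × List String)) : Decidable (Spec_partition_tags_by_category_py tags category_map out) := by unfold Spec_partition_tags_by_category_py; infer_instance

-- ===== CLAIM (what is proved, stated in full; the proofs are below) =====
def Claim_equal_partition_tags_by_category_py : Prop := ∀ (tags : List String) (category_map : List (String × String)), Dom_partition_tags_by_category_py tags category_map → Pre_partition_tags_by_category_py tags category_map → Spec_partition_tags_by_category_py tags category_map (partition_tags_by_category_py tags category_map)

-- ===== LEMMAS AND PROOFS =====

-- Set.update adds nothing when every element is already present.
theorem pv_update_of_subset {α : Type} [BEq α] [LawfulBEq α] (l : List α) (s : PySem.Set α)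
    (h : ∀ x ∈ l, s.contains x = true) : PySem.Set.update s l = s := by
  induction l generalizing s with
  | nil => rfl
  | cons a l ih =>
      simp only [PySem.Set.update, List.foldl_cons] at *
      have ha : a ∈ s := by have := h a (by simp); simpa [PySem.Set.contains] using this
      rw [show PySem.Set.add s a = s by simp [PySem.Set.add, ha]]
      exact ih s (fun x hx => h x (by simp [hx]))

theorem pv_filter_pairs (tags : List String) (g : String → String) (c : String) :
    (((tags.map (fun t => (g t, t))).filter (fun p => p.1 == c)).map (·.2))
      = tags.filter (fun t => g t == c) := by
  induction tags with
  | nil => rfl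
  | cons a l ih => by_cases h : g a == c <;> simp [h, ih]

-- ===== VERDICT (by name: the statement is the Claim_ definition above) =====
theorem partition_tags_by_category_py_spec : Claim_equal_partition_tags_by_category_py := by
  intro tags category_map _ hpre
  unfold Spec_partition_tags_by_category_py partition_tags_by_category_py partition_tags_by_category_py_alt
  set g : String → String := fun t => (PySem.Dict.mk category_map).getD t "other" with hg
  set d0 : PySem.Dict String (List String) :=
    PySem.Dict.mk [("cuisine", []), ("meat_or_diet", []), ("other", [])] with hd0
  have hnd0 : d0.keys.Nodup := by decide
  have hnd : (tags.foldl (fun b tag => b.modify (g tag) [] (fun xs => xs ++ [tag])) d0).keys.Nodup :=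
    PySem.Dict.nodup_keys_foldl_modify_key tags g [] (fun _ t xs => xs ++ [t]) d0 hnd0
  rw [PySem.Dict.items_eq_map_keys _ hnd []]
  have hkeys : (tags.foldl (fun b tag => b.modify (g tag) [] (fun xs => xs ++ [tag])) d0).keys
      = ["cuisine", "meat_or_diet", "other"] := by
    rw [PySem.Dict.keys_foldl_modify_key]
    have : d0.keys = ["cuisine", "meat_or_diet", "other"] := by decide
    rw [this]
    exact pv_update_of_subset (tags.map g) _ (by
      intro x hx
      obtain ⟨t, ht, rfl⟩ := List.mem_map.mp hx
      have := hpre t ht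
      simp only [List.mem_cons, List.not_mem_nil, or_false] at this
      rcases this with h | h | h <;> simp [hg, h, PySem.Set.contains])
  rw [hkeys]
  have hget : ∀ c : String,
      (tags.foldl (fun b tag => b.modify (g tag) [] (fun xs => xs ++ [tag])) d0).getD c []
        = d0.getD c [] ++ tags.filter (fun t => g t == c) := by
    intro c
    have := PySem.Dict.getD_foldl_modify_append (tags.map (fun t => (g t, t))) d0 c
    rw [List.foldl_map] at this
    rw [this, List.filter_map] at *
    rw [← pv_filter_pairs tags g c, List.filter_map]
  simp only [List.map_cons, List.map_nil, hget]
  have h1 : d0.getD "cuisine" [] = [] := by decide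
  have h2 : d0.getD "meat_or_diet" [] = [] := by decide
  have h3 : d0.getD "other" [] = [] := by decide
  rw [h1, h2, h3]
  simp [hg]
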